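-- pv_equiv track=rewrite | github.com/msg430/Project-Euler | problem37.py | giveNext
-- ===== SOURCE A (Python) =====
-- def giveNext(number):
--     number += 2
--     switch = False
--     while not switch:
--         asWord = str(number)
--         switch = True
--         if asWord[0] == 1 or asWord[len(asWord)-1] == 1:
--             number += 2
--             switch = False
--             continue
--         if asWord[0] == 9 or asWord[len(asWord)-1] == 9:
--             number += 2
--             switch = False
--             continue
--         for i in asWord:
--             if int(i) % 2 == 0:
--                 number += 2
--                 switch = False
--                 break
--     return number
-- ===== SOURCE B (Python) =====
-- def _all_odd(q):
--     # q > 0 and every decimal digit of q is odd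
--     if q <= 0:
--         return False
--     while q > 0:
--         if (q % 10) % 2 == 0:
--             return False
--         q //= 10
--     return True
--
-- def _next_all_odd(n):
--     # least m >= n whose decimal digits are all odd (hence m >= 1)
--     if n <= 1:
--         return 1
--     q, r = divmod(n, 10)
--     if q == 0:
--         return r if r % 2 == 1 else r + 1
--     if _all_odd(q):
--         return 10 * q + (r if r % 2 == 1 else r + 1)
--     return 10 * _next_all_odd(q + 1) + 1
--
-- def giveNext(number):
--     return _next_all_odd(number + 2)
-- ===== Notes on version B (the rewrite author's own statement) =====
-- stated objective: alternative
-- what changed: Instead of stepping the candidate by 2 and re-checking every digit of str(candidate) until all digits are odd, B directly constructs the least number >= number+2 with all-odd digits by one recursive digit round-up (keep an all-odd quotient, bump it otherwise, fill with 1s); Pre_ excludes even number (A loops forever) and odd number <= -3 (A raises ValueError).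
import Mathlib
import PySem

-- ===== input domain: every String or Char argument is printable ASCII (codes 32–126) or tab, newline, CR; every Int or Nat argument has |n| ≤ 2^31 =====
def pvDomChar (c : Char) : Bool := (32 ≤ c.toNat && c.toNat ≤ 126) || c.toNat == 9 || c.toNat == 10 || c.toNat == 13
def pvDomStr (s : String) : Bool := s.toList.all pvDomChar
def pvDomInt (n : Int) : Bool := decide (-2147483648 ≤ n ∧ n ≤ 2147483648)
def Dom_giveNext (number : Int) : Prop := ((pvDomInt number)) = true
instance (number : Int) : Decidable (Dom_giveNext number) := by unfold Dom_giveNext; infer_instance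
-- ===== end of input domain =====

-- B replaces A's step-by-2 search over str(candidate) by a direct digit construction of the
-- least all-odd-digit number ≥ number+2 (a different algorithm; A diverges/raises outside Pre_).

-- ===== PORT A =====
-- Python `str == int` is always False, for any operands (A compares a character with 1 or 9).
def pyEqStrInt (_ : Option Char) (_ : Int) : Bool := false

-- A's inner `for i in asWord: if int(i) % 2 == 0: …` — some true = broke out at an even digit,
-- some false = ran through, none = int(i) raised ValueError (the '-' sign character).
def evenCheck : List Char → Option Bool
  | [] => some false
  | c :: cs =>
    match PySem.Int.ofChars? [c] with
    | none => none
    | some v => if PySem.Int.mod v 2 = 0 then some true else evenCheck cs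

-- A's `while not switch` loop, fueled (A loops forever on an even candidate; the fuel covers
-- every input of Dom ∩ Pre_, see `fuel_bound`); on `none` (ValueError) we stop — outside Pre_.
def giveNextLoop : Nat → Int → Int
  | 0, number => number
  | fuel + 1, number =>
    let asWord := PySem.Int.toChars number
    if pyEqStrInt (PySem.List.pyGet? asWord 0) 1 || pyEqStrInt (PySem.List.pyGet? asWord ((asWord.length : Int) - 1)) 1 then
      giveNextLoop fuel (number + 2)
    else if pyEqStrInt (PySem.List.pyGet? asWord 0) 9 || pyEqStrInt (PySem.List.pyGet? asWord ((asWord.length : Int) - 1)) 9 then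
      giveNextLoop fuel (number + 2)
    else
      match evenCheck asWord with
      | some true => giveNextLoop fuel (number + 2)
      | some false => number
      | none => number

def giveNext (number : Int) : Int := giveNextLoop 1600000000 (number + 2)

-- ===== PORT B =====
-- Source B `_all_odd`'s while loop; the Nat argument is fuel only (a totality artifact: the loop
-- divides q by 10 each round, so fuel q.toNat + 1 is never exhausted).
def allOddLoop : Nat → Int → Bool
  | 0, _ => true
  | fuel + 1, q =>
    if q ≤ 0 then true
    else if PySem.Int.mod (PySem.Int.mod q 10) 2 = 0 then false
    else allOddLoop fuel (PySem.Int.floordiv q 10)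

def allOdd (q : Int) : Bool := if q ≤ 0 then false else allOddLoop (q.toNat + 1) q

-- Source B `_next_all_odd`; the Nat argument is fuel only (the recursion goes to n // 10 + 1 < n,
-- so fuel n.toNat + 1 is never exhausted).
def nextAllOddF : Nat → Int → Int
  | 0, _ => 1
  | fuel + 1, n =>
    if n ≤ 1 then 1
    else
      let q := PySem.Int.floordiv n 10
      let r := PySem.Int.mod n 10
      if q = 0 then (if PySem.Int.mod r 2 = 1 then r else r + 1)
      else if allOdd q then 10 * q + (if PySem.Int.mod r 2 = 1 then r else r + 1)
      else 10 * nextAllOddF fuel (q + 1) + 1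

def nextAllOdd (n : Int) : Int := nextAllOddF (n.toNat + 1) n

def giveNext_alt (number : Int) : Int := nextAllOdd (number + 2)

-- ===== PRECONDITION & SPEC =====
-- Pre_: A returns only when number+2 is odd and nonnegative: on even number every candidate
-- keeps an even last digit and the while loop never ends; on odd number ≤ -3 int('-') raises.
def Pre_giveNext (number : Int) : Prop := PySem.Int.mod number 2 = 1 ∧ 0 ≤ number + 1
instance (number : Int) : Decidable (Pre_giveNext number) := by unfold Pre_giveNext; infer_instance
def pvWitness_giveNext : Int := 5


def Spec_giveNext (number : Int) (out : Int) : Prop := out = giveNext_alt number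
instance (number : Int) (out : Int) : Decidable (Spec_giveNext number out) := by unfold Spec_giveNext; infer_instance

-- ===== CLAIM (what is proved, stated in full; the proofs are below) =====
def Claim_equal_giveNext : Prop := ∀ (number : Int), Dom_giveNext number → Pre_giveNext number → Spec_giveNext number (giveNext number)

-- ===== LEMMAS AND PROOFS =====

-- all decimal digits of n are odd (arithmetic form used by the proofs)
def AO (n : Nat) : Bool :=
  if n = 0 then true else (n % 10 % 2 == 1) && AO (n / 10)

-- all-odd-digit positive integer
def Pall (m : Int) : Prop := 1 ≤ m ∧ AO m.toNat = true

def oddChar (c : Char) : Bool := c.toNat % 2 == 1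

theorem AO_zero : AO 0 = true := by rw [AO]; simp

theorem AO_small (k : Nat) (h1 : 1 ≤ k) (h2 : k < 10) : AO k = (k % 2 == 1) := by
  rw [AO, if_neg (by omega), Nat.mod_eq_of_lt h2, Nat.div_eq_of_lt h2, AO_zero, Bool.and_true]

theorem AO_big : AO ((3111111111 : Int).toNat) = true := by
  rw [show (3111111111 : Int).toNat = 3111111111 from rfl]
  rw [AO]; norm_num; rw [AO]; norm_num; rw [AO]; norm_num; rw [AO]; norm_num
  rw [AO]; norm_num; rw [AO]; norm_num; rw [AO]; norm_num; rw [AO]; norm_num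
  rw [AO]; norm_num; rw [AO]; norm_num; exact AO_zero

theorem Pall_small (x : Int) (h1 : 1 ≤ x) (h9 : x < 10) (ho : x % 2 = 1) : Pall x :=
  ⟨h1, by rw [AO_small x.toNat (by omega) (by omega)]; simp; omega⟩

theorem Pall_odd (m : Int) (h : Pall m) : m % 2 = 1 := by
  obtain ⟨h1, h2⟩ := h
  rw [AO, if_neg (by omega : ¬ m.toNat = 0)] at h2
  simp only [Bool.and_eq_true, beq_iff_eq] at h2
  omega

theorem AO_compose (q r : Int) (hq : 1 ≤ q) (hr0 : 0 ≤ r) (hr9 : r < 10) (hro : r % 2 = 1)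
    (hAq : AO q.toNat = true) : AO (10 * q + r).toNat = true := by
  rw [AO, if_neg (by omega : ¬ (10 * q + r).toNat = 0)]
  have e1 : ((10 * q + r).toNat % 10 % 2 == 1) = true := by simp; omega
  have e2 : (10 * q + r).toNat / 10 = q.toNat := by omega
  rw [e1, Bool.true_and, e2, hAq]

theorem Pall_decomp (m : Int) (h10 : 10 ≤ m) (h : Pall m) : Pall (m / 10) ∧ m % 2 = 1 := by
  obtain ⟨h1, h2⟩ := h
  rw [AO, if_neg (by omega : ¬ m.toNat = 0)] at h2
  simp only [Bool.and_eq_true, beq_iff_eq] at h2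
  obtain ⟨ha, hb⟩ := h2
  have e2 : (m / 10).toNat = m.toNat / 10 := by omega
  exact ⟨⟨by omega, by rw [e2]; exact hb⟩, by omega⟩

-- every character of str(n) is a decimal digit character
theorem mem_toDigits_ten (n : Nat) : ∀ c ∈ Nat.toDigits 10 n, ∃ d, d < 10 ∧ c = Nat.digitChar d := by
  induction n using Nat.strong_induction_on with
  | _ n ih =>
    rw [Nat.toDigits_eq_if (by norm_num)]
    split_ifs with h
    · intro c hc; simp only [List.mem_singleton] at hc; exact ⟨n, h, hc⟩
    · intro c hc
      rcases List.mem_append.1 hc with h1 | h2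
      · exact ih (n / 10) (by omega) c h1
      · simp only [List.mem_singleton] at h2; exact ⟨n % 10, by omega, h2⟩

theorem ofChars_digitChar (d : Nat) (hd : d < 10) :
    PySem.Int.ofChars? [Nat.digitChar d] = some (d : Int) := by
  interval_cases d <;> decide

theorem oddChar_digitChar (d : Nat) (hd : d < 10) : oddChar (Nat.digitChar d) = (d % 2 == 1) := by
  interval_cases d <;> decide

theorem evenCheck_eq (cs : List Char) (h : ∀ c ∈ cs, ∃ d, d < 10 ∧ c = Nat.digitChar d) :
    evenCheck cs = some (! cs.all oddChar) := by
  induction cs with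
  | nil => simp [evenCheck]
  | cons c cs ih =>
    obtain ⟨d, hd, rfl⟩ := h _ (List.mem_cons_self ..)
    rw [evenCheck, ofChars_digitChar d hd]
    dsimp only
    have hmod : PySem.Int.mod (d : Int) 2 = ((d % 2 : Nat) : Int) := PySem.Int.mod_natCast d 2
    by_cases hp : d % 2 = 0
    · rw [if_pos (by rw [hmod, hp]; rfl)]
      simp [oddChar_digitChar d hd, hp]
    · rw [if_neg (by rw [hmod]; omega)]
      rw [ih (fun c hc => h c (List.mem_cons_of_mem _ hc))]
      simp [oddChar_digitChar d hd, Nat.mod_two_ne_zero.mp hp]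

theorem all_toDigits_AO (n : Nat) (h1 : 1 ≤ n) : (Nat.toDigits 10 n).all oddChar = AO n := by
  induction n using Nat.strong_induction_on with
  | _ n ih =>
    rw [Nat.toDigits_eq_if (by norm_num), AO, if_neg (by omega : ¬ n = 0)]
    split_ifs with h
    · rw [Nat.mod_eq_of_lt h, Nat.div_eq_of_lt h, AO_zero, Bool.and_true]
      simp [oddChar_digitChar n h]
    · rw [List.all_append, ih (n / 10) (by omega) (by omega)]
      simp [oddChar_digitChar (n % 10) (by omega)]
      rw [Bool.and_comm]

theorem evenCheck_toChars (m : Int) (h : 1 ≤ m) :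
    evenCheck (PySem.Int.toChars m) = some (! AO m.toNat) := by
  unfold PySem.Int.toChars
  rw [if_neg (by omega)]
  rw [evenCheck_eq _ (mem_toDigits_ten m.toNat), all_toDigits_AO m.toNat (by omega)]

theorem allOddLoop_eq (fuel : Nat) (q : Int) (hf : q.toNat < fuel) : allOddLoop fuel q = AO q.toNat := by
  induction fuel generalizing q with
  | zero => omega
  | succ f ih =>
    rw [allOddLoop]
    by_cases h0 : q ≤ 0
    · rw [if_pos h0, show q.toNat = 0 by omega, AO_zero]
    · rw [if_neg h0]
      have hm : PySem.Int.mod (PySem.Int.mod q 10) 2 = q % 10 % 2 := by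
        rw [PySem.Int.mod_eq_emod_of_pos (by norm_num), PySem.Int.mod_eq_emod_of_pos (by norm_num)]
      have hd : PySem.Int.floordiv q 10 = q / 10 := PySem.Int.floordiv_eq_ediv_of_pos (by norm_num)
      rw [hm, hd, AO, if_neg (by omega : ¬ q.toNat = 0)]
      by_cases hp : q % 10 % 2 = 0
      · rw [if_pos hp]
        have : (q.toNat % 10 % 2 == 1) = false := by simp; omega
        rw [this, Bool.false_and]
      · rw [if_neg hp, ih (q / 10) (by omega)]
        have h1 : (q.toNat % 10 % 2 == 1) = true := by simp; omega
        have h2 : (q / 10).toNat = q.toNat / 10 := by omega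
        rw [h1, Bool.true_and, h2]

theorem allOdd_iff (q : Int) : allOdd q = true ↔ Pall q := by
  unfold allOdd Pall
  by_cases h0 : q ≤ 0
  · rw [if_pos h0]
    simp only [Bool.false_eq_true, false_iff]
    intro h
    exact absurd h.1 (by omega)
  · rw [if_neg h0, allOddLoop_eq _ _ (by omega)]
    exact ⟨fun h => ⟨by omega, h⟩, fun ⟨_, h⟩ => h⟩

-- B's construction is the least all-odd-digit number ≥ n
theorem nextAllOddF_spec (fuel : Nat) : ∀ n : Int, n.toNat < fuel →
    Pall (nextAllOddF fuel n) ∧ n ≤ nextAllOddF fuel n ∧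
      ∀ m, n ≤ m → m < nextAllOddF fuel n → ¬ Pall m := by
  induction fuel with
  | zero => intro n h; omega
  | succ f ih =>
    intro n hf
    rw [nextAllOddF]
    by_cases h1 : n ≤ 1
    · rw [if_pos h1]
      exact ⟨Pall_small 1 le_rfl (by norm_num) (by norm_num), by omega,
        fun m hm1 hm2 hP => by have := hP.1; omega⟩
    · rw [if_neg h1]
      dsimp only
      have hd : PySem.Int.floordiv n 10 = n / 10 := PySem.Int.floordiv_eq_ediv_of_pos (by norm_num)
      have hm : PySem.Int.mod n 10 = n % 10 := PySem.Int.mod_eq_emod_of_pos (by norm_num)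
      have hm2 : PySem.Int.mod (PySem.Int.mod n 10) 2 = n % 10 % 2 := by
        rw [hm, PySem.Int.mod_eq_emod_of_pos (by norm_num)]
      rw [hd, hm2, hm]
      by_cases hq0 : n / 10 = 0
      · rw [if_pos hq0]
        by_cases hro : n % 10 % 2 = 1
        · rw [if_pos hro]
          exact ⟨Pall_small _ (by omega) (by omega) (by omega), by omega,
            fun m hm1 hm2 _ => by omega⟩
        · rw [if_neg hro]
          refine ⟨Pall_small _ (by omega) (by omega) (by omega), by omega, ?_⟩
          intro m hm1 hm2 hP
          have := Pall_odd m hP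
          omega
      · rw [if_neg hq0]
        by_cases hAq : allOdd (n / 10) = true
        · rw [if_pos hAq]
          have hPq : Pall (n / 10) := (allOdd_iff _).1 hAq
          by_cases hro : n % 10 % 2 = 1
          · rw [if_pos hro]
            refine ⟨⟨by omega, AO_compose _ _ hPq.1 (by omega) (by omega) (by omega) hPq.2⟩,
              by omega, fun m hm1 hm2 _ => by omega⟩
          · rw [if_neg hro]
            refine ⟨⟨by omega, AO_compose _ _ hPq.1 (by omega) (by omega) (by omega) hPq.2⟩,
              by omega, ?_⟩
            intro m hm1 hm2 hP
            have := Pall_odd m hP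
            omega
        · rw [if_neg hAq]
          have hn10 : 10 ≤ n := by omega
          obtain ⟨Pg, hng, ming⟩ := ih (n / 10 + 1) (by omega)
          refine ⟨⟨by have := Pg.1; omega,
              AO_compose _ 1 Pg.1 (by norm_num) (by norm_num) (by norm_num) Pg.2⟩,
            by have := Pg.1; omega, ?_⟩
          intro m hnm hmo hPm
          obtain ⟨PM, hodd⟩ := Pall_decomp m (by omega) hPm
          by_cases hMeq : m / 10 = n / 10
          · rw [← hMeq] at hAq
            exact hAq ((allOdd_iff _).2 PM)
          · by_cases hlt : m / 10 < nextAllOddF f (n / 10 + 1)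
            · exact ming (m / 10) (by omega) hlt PM
            · omega

theorem nextAllOdd_spec (n : Int) :
    Pall (nextAllOdd n) ∧ n ≤ nextAllOdd n ∧
      ∀ m, n ≤ m → m < nextAllOdd n → ¬ Pall m := by
  unfold nextAllOdd
  exact nextAllOddF_spec (n.toNat + 1) n (by omega)

theorem nextAllOdd_eq (n x : Int) (hx : Pall x) (hnx : n ≤ x)
    (hmin : ∀ m, n ≤ m → m < x → ¬ Pall m) : nextAllOdd n = x := by
  obtain ⟨P, hle, hm⟩ := nextAllOdd_spec n
  rcases lt_trichotomy (nextAllOdd n) x with h | h | h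
  · exact absurd P (hmin _ hle h)
  · exact h
  · exact absurd hx (hm x hnx h)

theorem nextAllOdd_fixed (s : Int) (h : Pall s) : nextAllOdd s = s :=
  nextAllOdd_eq s s h le_rfl (fun m h1 h2 _ => by omega)

theorem nextAllOdd_shift (s : Int) (h0 : ¬ Pall s) (h1 : ¬ Pall (s + 1)) :
    nextAllOdd (s + 2) = nextAllOdd s := by
  obtain ⟨P2, le2, min2⟩ := nextAllOdd_spec (s + 2)
  refine (nextAllOdd_eq s (nextAllOdd (s + 2)) P2 (by omega) ?_).symm
  intro m hm hlt hP
  have : m = s ∨ m = s + 1 ∨ s + 2 ≤ m := by omega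
  rcases this with rfl | h | h
  · exact h0 hP
  · exact h1 (h ▸ hP)
  · exact min2 m h hlt hP

theorem loop_eq (fuel : Nat) : ∀ s : Int, 1 ≤ s → s % 2 = 1 →
    nextAllOdd s ≤ s + 2 * fuel → giveNextLoop fuel s = nextAllOdd s := by
  induction fuel with
  | zero =>
    intro s h1 _ hb
    obtain ⟨_, hle, _⟩ := nextAllOdd_spec s
    rw [giveNextLoop]; omega
  | succ f ih =>
    intro s h1 hodd hb
    rw [giveNextLoop]
    simp only [pyEqStrInt, Bool.or_self, Bool.false_eq_true, if_false]
    rw [evenCheck_toChars s h1]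
    by_cases hA : AO s.toNat = true
    · rw [hA]
      exact (nextAllOdd_fixed s ⟨h1, hA⟩).symm
    · rw [Bool.not_eq_true] at hA
      rw [hA]
      have hs0 : ¬ Pall s := fun hP => by rw [hP.2] at hA; cases hA
      have hs1 : ¬ Pall (s + 1) := fun hP => by have := Pall_odd _ hP; omega
      have hshift := nextAllOdd_shift s hs0 hs1
      show giveNextLoop f (s + 2) = nextAllOdd s
      rw [ih (s + 2) (by omega) (by omega) (by omega), hshift]

theorem nextAllOdd_le (s : Int) (h1 : 1 ≤ s) (h2 : s ≤ 2147483650) :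
    nextAllOdd s ≤ 3111111111 := by
  obtain ⟨_, _, hmin⟩ := nextAllOdd_spec s
  by_contra hlt
  exact hmin 3111111111 (by omega) (by omega) ⟨by norm_num, AO_big⟩

-- ===== VERDICT (by name: the statement is the Claim_ definition above) =====
theorem giveNext_spec : Claim_equal_giveNext := by
  intro number hDom hPre
  obtain ⟨ho, hge⟩ := hPre
  have hodd : number % 2 = 1 := by
    rwa [PySem.Int.mod_eq_emod_of_pos (by norm_num)] at ho
  have hle : number ≤ 2147483648 := by
    unfold Dom_giveNext pvDomInt at hDom
    simp only [decide_eq_true_eq] at hDom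
    omega
  unfold Spec_giveNext giveNext giveNext_alt
  have hb : nextAllOdd (number + 2) ≤ (number + 2) + 2 * 1600000000 := by
    have := nextAllOdd_le (number + 2) (by omega) (by omega)
    omega
  exact loop_eq 1600000000 (number + 2) (by omega) (by omega) hb
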